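-- pv_equiv track=rewrite | github.com/ptak-2033/plama | mapa/auto_start/dodawanie/automatyzacja/python/tekst na ekranie/opcje/edytuj/gui.py | get
-- ===== SOURCE A (Python) =====
-- def get(lines, section, key, default=""):
--     sec = None
--     for l in lines:
--         s = l.strip()
--         if s.startswith("[") and s.endswith("]"):
--             sec = s[1:-1].lower()
--             continue
--         if sec == section and "=" in s:
--             k, v = s.split("=", 1)
--             if k.strip().lower() == key:
--                 return v.split(";", 1)[0].strip()
--     return default
-- ===== SOURCE B (Python) =====
-- def get(lines, section, key, default=""):
--     # Staged pipeline instead of one guided scan with early return: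
--     # Stage 1: tag every non-header line with its (lowercased) current section.
--     tagged = []
--     sec = None
--     for l in lines:
--         s = l.strip()
--         if s.startswith("[") and s.endswith("]"):
--             sec = s[1:-1].lower()
--         else:
--             tagged.append((sec, s))
--     # Stage 2: parse all key=value lines into (section, key, value) entries.
--     entries = [
--         (tsec, s.split("=", 1)[0].strip().lower(),
--          s.split("=", 1)[1].split(";", 1)[0].strip())
--         for tsec, s in tagged if "=" in s
--     ]
--     # Stage 3: first entry matching (section, key), else default.
--     return next((v for tsec, k, v in entries if tsec == section and k == key), default)
-- ===== Notes on version B (the rewrite author's own statement) =====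
-- stated objective: alternative
-- what changed: A is a single guided scan with an early return; B is a three-stage pipeline: tag each line with its current section, parse every key=value line into a flat (section,key,value) entry list, then take the first matching entry with next()/find.
import Mathlib
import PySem

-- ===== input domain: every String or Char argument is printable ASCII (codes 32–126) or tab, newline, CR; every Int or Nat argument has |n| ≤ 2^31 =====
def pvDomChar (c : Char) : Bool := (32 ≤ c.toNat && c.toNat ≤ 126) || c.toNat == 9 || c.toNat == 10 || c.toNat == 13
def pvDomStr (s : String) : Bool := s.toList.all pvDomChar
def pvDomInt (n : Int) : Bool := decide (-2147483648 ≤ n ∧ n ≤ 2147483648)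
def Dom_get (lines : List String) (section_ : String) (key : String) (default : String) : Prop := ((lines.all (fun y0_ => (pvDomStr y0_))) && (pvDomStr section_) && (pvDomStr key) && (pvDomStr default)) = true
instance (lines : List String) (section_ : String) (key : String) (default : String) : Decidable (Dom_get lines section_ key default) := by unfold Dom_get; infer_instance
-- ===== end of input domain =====

-- B replaces A's guided scan with early return by a three-stage pipeline
-- (tag lines with their section, parse all entries, take the first match);
-- objective: alternative (same cost, different algorithm).

-- ===== PORT A =====
-- the for-loop with early return, as structural recursion over the remaining lines;
-- the loop variable `sec` (None initially) is `Option String`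
def getLoop : List String → String → String → Option String → Option String
  | [], _, _, _ => none
  | l :: rest, section_, key, sec =>
    let s := PySem.Str.strip l
    if PySem.Str.startswith s "[" && PySem.Str.endswith s "]" then
      getLoop rest section_ key (some (PySem.Str.lower (PySem.Str.slice s (some 1) (some (-1)))))
    else if sec == some section_ && PySem.Str.isIn "=" s then
      -- k, v = s.split("=", 1)  (the guard "=" in s guarantees exactly two pieces)
      let parts := (PySem.Str.splitMax? s "=" 1).getD []
      let k := parts.getD 0 ""
      let v := parts.getD 1 ""
      if PySem.Str.lower (PySem.Str.strip k) == key then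
        some (PySem.Str.strip (((PySem.Str.splitMax? v ";" 1).getD []).getD 0 ""))
      else getLoop rest section_ key sec
    else getLoop rest section_ key sec

def get (lines : List String) (section_ : String) (key : String) (default : String) : String :=
  (getLoop lines section_ key none).getD default

-- ===== PORT B =====
-- Stage 1: tag each non-header (stripped) line with its current section
def tagLines : List String → Option String → List (Option String × String)
  | [], _ => []
  | l :: rest, sec =>
    let s := PySem.Str.strip l
    if PySem.Str.startswith s "[" && PySem.Str.endswith s "]" then
      tagLines rest (some (PySem.Str.lower (PySem.Str.slice s (some 1) (some (-1)))))
    else (sec, s) :: tagLines rest sec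

-- Stage 2: parse every key=value line into a flat (section, key, value) entry
def parseEntries (ts : List (Option String × String)) : List (Option String × String × String) :=
  ts.filterMap (fun t =>
    if PySem.Str.isIn "=" t.2 then
      some (t.1,
            PySem.Str.lower (PySem.Str.strip (((PySem.Str.splitMax? t.2 "=" 1).getD []).getD 0 "")),
            PySem.Str.strip (((PySem.Str.splitMax? (((PySem.Str.splitMax? t.2 "=" 1).getD []).getD 1 "") ";" 1).getD []).getD 0 ""))
    else none)

-- Stage 3: the first entry whose section and key match, else the default
def get_alt (lines : List String) (section_ : String) (key : String) (default : String) : String :=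
  match (parseEntries (tagLines lines none)).find?
      (fun e => e.1 == some section_ && e.2.1 == key) with
  | some e => e.2.2
  | none => default

-- ===== PRECONDITION & SPEC =====
def Spec_get (lines : List String) (section_ : String) (key : String) (default : String) (out : String) : Prop := out = get_alt lines section_ key default
instance (lines : List String) (section_ : String) (key : String) (default : String) (out : String) : Decidable (Spec_get lines section_ key default out) := by unfold Spec_get; infer_instance

-- ===== CLAIM (what is proved, stated in full; the proofs are below) =====
def Claim_equal_get : Prop := ∀ (lines : List String) (section_ : String) (key : String) (default : String), Dom_get lines section_ key default → Spec_get lines section_ key default (get lines section_ key default)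

-- ===== LEMMAS AND PROOFS =====

-- A's scan from state `sec` is exactly "find the first matching entry among the
-- parsed tagged lines from the same state, and project its value"
theorem getLoop_eq_find (section_ key : String) (lines : List String) :
    ∀ (sec : Option String),
      getLoop lines section_ key sec
        = ((parseEntries (tagLines lines sec)).find?
            (fun e => e.1 == some section_ && e.2.1 == key)).map (fun e => e.2.2) := by
  induction lines with
  | nil => intro sec; simp [getLoop, tagLines, parseEntries]
  | cons l rest ih =>
    intro sec
    rw [getLoop.eq_def, tagLines.eq_def]
    dsimp only
    by_cases hhd : (PySem.Str.startswith (PySem.Str.strip l) "[" && PySem.Str.endswith (PySem.Str.strip l) "]") = true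
    · simp only [hhd, if_true]; exact ih _
    · simp only [Bool.not_eq_true] at hhd
      simp only [hhd, Bool.false_eq_true, if_false]
      by_cases heq : (PySem.Str.isIn "=" (PySem.Str.strip l)) = true
      · -- the line contributes an entry
        rw [parseEntries, List.filterMap_cons]
        simp only [heq, if_true]
        rw [List.find?_cons]
        by_cases hsec : (sec == some section_) = true
        · simp only [hsec, Bool.and_true, if_true]
          by_cases hk : (PySem.Str.lower (PySem.Str.strip (((PySem.Str.splitMax? (PySem.Str.strip l) "=" 1).getD []).getD 0 "")) == key) = true
          · simp only [hk, Bool.and_self, if_true]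
            rfl
          · simp only [Bool.not_eq_true] at hk
            simp only [hk, Bool.and_false, Bool.false_eq_true, if_false]
            exact ih sec
        · simp only [Bool.not_eq_true] at hsec
          simp only [hsec, Bool.false_and, Bool.false_eq_true, if_false]
          exact ih sec
      · simp only [Bool.not_eq_true] at heq
        simp only [heq, Bool.and_false, Bool.false_eq_true, if_false]
        rw [parseEntries, List.filterMap_cons]
        simp only [heq, Bool.false_eq_true, if_false]
        exact ih sec

-- ===== VERDICT (by name: the statement is the Claim_ definition above) =====
theorem get_spec : Claim_equal_get := by
  intro lines section_ key default _
  unfold Spec_get _root_.get get_alt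
  rw [getLoop_eq_find]
  cases (parseEntries (tagLines lines none)).find? (fun e => e.1 == some section_ && e.2.1 == key) with
  | none => rfl
  | some e => rfl
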